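-- pv_equiv track=rewrite | github.com/agroce/tstl | tstl/triage.py | noStrings
-- ===== SOURCE A (Python) =====
-- def noStrings(str):
--     noStrStr = ""
--     inQuote = False
--     for c in str:
--         if inQuote:
--             if c == "'":
--                 noStrStr += c
--                 inQuote = False
--         else:
--             noStrStr += c
--             if c == "'":
--                 inQuote = True
--     return noStrStr
-- ===== SOURCE B (Python) =====
-- def noStrings(str):
--     parts = str.split("'")
--     return "'".join(p if i % 2 == 0 else '' for i, p in enumerate(parts))
-- ===== Notes on version B (the rewrite author's own statement) =====
-- stated objective: simpler
-- what changed: Replaced the per-character inQuote state machine by splitting the string on the quote character and rejoining: even-indexed parts (outside quotes) are kept, odd-indexed parts (inside quotes) are emptied, and the join restores every quote delimiter.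
import Mathlib
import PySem

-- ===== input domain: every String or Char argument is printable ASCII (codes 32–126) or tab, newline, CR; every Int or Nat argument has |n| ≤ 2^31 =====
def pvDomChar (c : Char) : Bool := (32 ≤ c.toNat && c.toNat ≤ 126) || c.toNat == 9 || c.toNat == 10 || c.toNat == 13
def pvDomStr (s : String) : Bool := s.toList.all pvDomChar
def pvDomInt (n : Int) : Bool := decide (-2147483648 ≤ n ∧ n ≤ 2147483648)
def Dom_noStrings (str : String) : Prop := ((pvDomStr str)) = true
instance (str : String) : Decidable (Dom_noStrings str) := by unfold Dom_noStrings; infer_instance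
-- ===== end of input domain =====

-- B replaces A's per-character inQuote state machine by split-on-quote / rejoin
-- (even-indexed parts kept, odd-indexed parts emptied): simpler, same return value.


-- ===== PORT A =====
-- A's loop body: state = (noStrStr, inQuote), branches in A's order
def noStringsStep (st : List Char × Bool) (c : Char) : List Char × Bool :=
  if st.2 then
    if c == '\'' then (st.1 ++ [c], false) else st
  else
    (st.1 ++ [c], c == '\'')

def noStrings (str : String) : String :=
  String.ofList (str.toList.foldl noStringsStep (([] : List Char), false)).1

-- ===== PORT B =====
-- str.split("'") (single-char separator) ported as List.splitOn; then
-- "'".join(p if i % 2 == 0 else '' for i, p in enumerate(parts))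
def noStrings_alt (str : String) : String :=
  String.ofList (PySem.Chars.join ['\'']
    ((PySem.List.enumerate (str.toList.splitOn '\'') 0).map fun ip =>
      if PySem.Int.mod ip.1 2 = 0 then ip.2 else []))

-- ===== PRECONDITION & SPEC =====
def Spec_noStrings (str : String) (out : String) : Prop := out = noStrings_alt str
instance (str : String) (out : String) : Decidable (Spec_noStrings str out) := by unfold Spec_noStrings; infer_instance

-- ===== CLAIM (what is proved, stated in full; the proofs are below) =====
def Claim_equal_noStrings : Prop := ∀ (str : String), Dom_noStrings str → Spec_noStrings str (noStrings str)

-- ===== LEMMAS AND PROOFS =====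

-- A's loop as a structural recursion (the suffix A appends, given the inQuote flag)
def fA : List Char → Bool → List Char
  | [], _ => []
  | c :: cs, q =>
    if q then (if c == '\'' then c :: fA cs false else fA cs true)
    else c :: fA cs (c == '\'')

lemma step_false (acc : List Char) (c : Char) :
    noStringsStep (acc, false) c = (acc ++ [c], c == '\'') := rfl

lemma step_true_pos (acc : List Char) (c : Char) (h : (c == '\'') = true) :
    noStringsStep (acc, true) c = (acc ++ [c], false) := by
  simp [noStringsStep, h]

lemma step_true_neg (acc : List Char) (c : Char) (h : ¬ (c == '\'') = true) :
    noStringsStep (acc, true) c = (acc, true) := by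
  simp [noStringsStep]
  intro hc
  exact absurd (by simp [hc]) h

lemma foldl_eq_fA (cs : List Char) : ∀ (acc : List Char) (q : Bool),
    (cs.foldl noStringsStep (acc, q)).1 = acc ++ fA cs q := by
  induction cs with
  | nil => intro acc q; simp [fA]
  | cons c cs ih =>
    intro acc q
    cases q with
    | false =>
      rw [List.foldl_cons, step_false, ih]
      simp [fA]
    | true =>
      by_cases h : (c == '\'') = true
      · rw [List.foldl_cons, step_true_pos acc c h, ih]
        simp [fA, h]
      · rw [List.foldl_cons, step_true_neg acc c h, ih]
        simp only [fA, if_true]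
        rw [if_neg h]

-- "'".join of a two-or-more-part list
lemma join_cons2 (p q : List Char) (r : List (List Char)) :
    PySem.Chars.join ['\''] (p :: q :: r) = p ++ '\'' :: PySem.Chars.join ['\''] (q :: r) := by
  simp [PySem.Chars.join, List.intercalate, List.intersperse]

-- B's join-with-parity as a structural recursion over the parts (keep = index even)
def gB : List (List Char) → Bool → List Char
  | [], _ => []
  | [p], keep => if keep then p else []
  | p :: q :: rest, keep => (if keep then p else []) ++ '\'' :: gB (q :: rest) (!keep)

lemma join_enumerate_eq_gB (parts : List (List Char)) : ∀ (s : Int),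
    PySem.Chars.join ['\'']
      ((PySem.List.enumerate parts s).map fun ip =>
        if PySem.Int.mod ip.1 2 = 0 then ip.2 else [])
      = gB parts (decide (PySem.Int.mod s 2 = 0)) := by
  induction parts with
  | nil => intro s; simp [gB, PySem.List.enumerate_nil]
  | cons p rest ih =>
    intro s
    have hpar : PySem.Int.mod (s + 1) 2 = 0 ↔ ¬ PySem.Int.mod s 2 = 0 := by
      rw [PySem.Int.mod_eq_emod_of_pos (by omega), PySem.Int.mod_eq_emod_of_pos (by omega)]
      omega
    cases rest with
    | nil =>
      simp [gB, PySem.List.enumerate_cons, PySem.List.enumerate_nil]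
    | cons q rest' =>
      have ihq := ih (s + 1)
      rw [PySem.List.enumerate_cons, List.map_cons] at ihq
      rw [PySem.List.enumerate_cons, PySem.List.enumerate_cons, List.map_cons, List.map_cons,
        join_cons2, ihq]
      have hb : (decide (PySem.Int.mod (s + 1) 2 = 0)) = !(decide (PySem.Int.mod s 2 = 0)) := by
        by_cases h : PySem.Int.mod s 2 = 0 <;> by_cases h2 : PySem.Int.mod (s + 1) 2 = 0 <;>
          simp_all
      rw [hb]
      simp [gB]

lemma gB_modifyHead_false (ps : List (List Char)) (c : Char) (h : ps ≠ []) :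
    gB (ps.modifyHead (List.cons c)) false = gB ps false := by
  cases ps with
  | nil => exact absurd rfl h
  | cons p rest => cases rest <;> simp [gB]

lemma gB_modifyHead_true (ps : List (List Char)) (c : Char) (h : ps ≠ []) :
    gB (ps.modifyHead (List.cons c)) true = c :: gB ps true := by
  cases ps with
  | nil => exact absurd rfl h
  | cons p rest => cases rest <;> simp [gB]

lemma fA_eq_gB_splitOn (cs : List Char) : ∀ (q : Bool),
    fA cs q = gB (cs.splitOn '\'') (!q) := by
  induction cs with
  | nil =>
    intro q
    have h0 : ([] : List Char).splitOn '\'' = [[]] := rfl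
    cases q <;> simp [fA, h0, gB]
  | cons c cs ih =>
    intro q
    have hne : cs.splitOn '\'' ≠ [] := List.splitOnP_ne_nil _ cs
    by_cases h : (c == '\'') = true
    · have hc : c = '\'' := by simpa using h
      subst hc
      have hsplit : ('\'' :: cs).splitOn '\'' = [] :: cs.splitOn '\'' := by
        show List.splitOnP (· == '\'') ('\'' :: cs) = [] :: List.splitOnP (· == '\'') cs
        rw [List.splitOnP_cons]
        simp
      have hfa : fA ('\'' :: cs) q = '\'' :: fA cs (!q) := by
        cases q <;> simp [fA]
      cases hne' : cs.splitOn '\'' with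
      | nil => exact absurd hne' hne
      | cons p rest =>
        rw [hfa, hsplit, hne', ih (!q)]
        rw [hne']
        cases q <;> simp [gB]
    · have hcf : (c == '\'') = false := by
        cases hb : (c == '\'') with
        | true => exact absurd hb h
        | false => rfl
      have hsplit : (c :: cs).splitOn '\'' = (cs.splitOn '\'').modifyHead (List.cons c) := by
        show List.splitOnP (· == '\'') (c :: cs) = List.modifyHead (List.cons c) (List.splitOnP (· == '\'') cs)
        rw [List.splitOnP_cons]
        simp [hcf]
      cases q with
      | true =>
        have hfa : fA (c :: cs) true = fA cs true := by simp [fA, hcf]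
        rw [hfa, hsplit, Bool.not_true, gB_modifyHead_false _ c hne, ih true, Bool.not_true]
      | false =>
        have hfa : fA (c :: cs) false = c :: fA cs false := by simp [fA, hcf]
        rw [hfa, hsplit, Bool.not_false, gB_modifyHead_true _ c hne, ih false, Bool.not_false]

-- ===== VERDICT (by name: the statement is the Claim_ definition above) =====
theorem noStrings_spec : Claim_equal_noStrings := by
  intro str _
  unfold Spec_noStrings noStrings noStrings_alt
  rw [foldl_eq_fA, join_enumerate_eq_gB]
  have h0 : (decide (PySem.Int.mod 0 2 = 0)) = true := by decide
  rw [h0]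
  have h1 := fA_eq_gB_splitOn str.toList false
  rw [Bool.not_false] at h1
  rw [List.nil_append, h1]
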